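-- pv_equiv track=rewrite | github.com/srpenmats/social-agent-hackathon | backend/services/response_generator.py | extract_voice_rules
-- ===== SOURCE A (Python) =====
-- def extract_voice_rules(context: str) -> str:
--     """Extract key voice rules from Jen context."""
--     # Look for voice rules section or use defaults
--     if "voice" in context.lower() and "casual" in context.lower():
--         # Try to extract voice section
--         lines = context.split('\n')
--         voice_section = []
--         in_voice = False
--         for line in lines:
--             if 'voice' in line.lower() and ('rule' in line.lower() or 'guideline' in line.lower()):
--                 in_voice = True
--             if in_voice:
--                 voice_section.append(line)
--                 if len(voice_section) > 20:  # Limit size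
--                     break
--         if voice_section:
--             return '\n'.join(voice_section)
--
--     # Default voice rules
--     return """
-- - Casual delivery, technical substance
-- - Short over long (ideally <200 chars)
-- - Specific over generic (reference actual content)
-- - Experience-based framing ("we've seen..." not "best practice is...")
-- - Direct but not harsh
-- - No corporate speak ever
-- - No marketing language
-- - No condescension
-- - No empty enthusiasm
-- """
-- ===== SOURCE B (Python) =====
-- DEFAULT_VOICE_RULES = """
-- - Casual delivery, technical substance
-- - Short over long (ideally <200 chars)
-- - Specific over generic (reference actual content)
-- - Experience-based framing ("we've seen..." not "best practice is...")
-- - Direct but not harsh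
-- - No corporate speak ever
-- - No marketing language
-- - No condescension
-- - No empty enthusiasm
-- """
--
--
-- def extract_voice_rules(context: str) -> str:
--     """Extract key voice rules from Jen context."""
--     low = context.lower()
--     if "voice" in low and "casual" in low:
--         lines = context.split('\n')
--         start = next((i for i, line in enumerate(lines)
--                       if 'voice' in line.lower()
--                       and ('rule' in line.lower() or 'guideline' in line.lower())),
--                      None)
--         if start is not None:
--             return '\n'.join(lines[start:start + 21])
--     return DEFAULT_VOICE_RULES
-- ===== Notes on version B (the rewrite author's own statement) =====
-- stated objective: simpler
-- what changed: Replaces the in_voice flag threaded through an accumulate-and-break loop with a find-first-matching-line-index followed by a plain 21-line slice and join.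
import Mathlib
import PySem

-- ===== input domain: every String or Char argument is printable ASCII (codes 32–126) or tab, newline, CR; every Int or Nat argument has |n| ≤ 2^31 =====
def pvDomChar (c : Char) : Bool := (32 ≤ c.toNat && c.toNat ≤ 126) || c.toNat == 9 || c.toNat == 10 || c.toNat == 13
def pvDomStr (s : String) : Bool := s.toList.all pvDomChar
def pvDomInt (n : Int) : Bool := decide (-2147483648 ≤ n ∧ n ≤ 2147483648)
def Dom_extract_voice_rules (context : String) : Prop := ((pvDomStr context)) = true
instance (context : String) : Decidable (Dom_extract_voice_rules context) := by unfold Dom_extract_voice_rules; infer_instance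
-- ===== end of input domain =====

-- B replaces A's in_voice flag + accumulate-and-break loop by find-first-index + 21-line slice + join; objective: simpler.

-- shared: Python's default voice rules literal
def defaultVoiceRules : String := "\n- Casual delivery, technical substance\n- Short over long (ideally <200 chars)\n- Specific over generic (reference actual content)\n- Experience-based framing (\"we've seen...\" not \"best practice is...\")\n- Direct but not harsh\n- No corporate speak ever\n- No marketing language\n- No condescension\n- No empty enthusiasm\n"

-- shared predicate: 'voice' in line.lower() and ('rule' in line.lower() or 'guideline' in line.lower())
def voiceLine (line : String) : Bool :=
  PySem.Str.isIn "voice" (PySem.Str.lower line) &&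
    (PySem.Str.isIn "rule" (PySem.Str.lower line) || PySem.Str.isIn "guideline" (PySem.Str.lower line))

-- ===== PORT A =====
-- A's for-loop with in_voice flag, append, and break once len(voice_section) > 20
def loopA : List String → List String → Bool → List String
  | [], acc, _ => acc
  | line :: rest, acc, inv =>
    let inv := if voiceLine line then true else inv
    if inv then
      let acc := acc ++ [line]
      if acc.length > 20 then acc else loopA rest acc inv
    else loopA rest acc inv

def extract_voice_rules (context : String) : String :=
  if PySem.Str.isIn "voice" (PySem.Str.lower context) &&
      PySem.Str.isIn "casual" (PySem.Str.lower context) then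
    let lines := (PySem.Str.split? context "\n").getD []
    let voice_section := loopA lines [] false
    if voice_section ≠ [] then PySem.Str.join "\n" voice_section
    else defaultVoiceRules
  else defaultVoiceRules

-- ===== PORT B =====
def extract_voice_rules_alt (context : String) : String :=
  let low := PySem.Str.lower context
  if PySem.Str.isIn "voice" low && PySem.Str.isIn "casual" low then
    let lines := (PySem.Str.split? context "\n").getD []
    match lines.findIdx? voiceLine with
    | some start =>
        PySem.Str.join "\n" (PySem.List.slice lines (some (start : Int)) (some ((start : Int) + 21)))
    | none => defaultVoiceRules
  else defaultVoiceRules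

-- ===== PRECONDITION & SPEC =====
def Spec_extract_voice_rules (context : String) (out : String) : Prop := out = extract_voice_rules_alt context
instance (context : String) (out : String) : Decidable (Spec_extract_voice_rules context out) := by unfold Spec_extract_voice_rules; infer_instance

-- ===== CLAIM (what is proved, stated in full; the proofs are below) =====
def Claim_equal_extract_voice_rules : Prop := ∀ (context : String), Dom_extract_voice_rules context → Spec_extract_voice_rules context (extract_voice_rules context)

-- ===== LEMMAS AND PROOFS =====

-- once in_voice is set, A collects lines until the section holds 21 of them
theorem loopA_true : ∀ (ls acc : List String), acc.length ≤ 20 →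
    loopA ls acc true = acc ++ ls.take (21 - acc.length)
  | [], acc, _ => by simp [loopA]
  | line :: rest, acc, hacc => by
    have h1 : (if voiceLine line then true else true) = true := by split <;> rfl
    by_cases h : (acc ++ [line]).length > 20
    · have h20 : acc.length = 20 := by simp at h ⊢; omega
      simp [loopA, h20, List.take_succ_cons]
    · have hle : (acc ++ [line]).length ≤ 20 := by omega
      have hrec := loopA_true rest (acc ++ [line]) hle
      have h2 : 21 - acc.length = (21 - (acc ++ [line]).length) + 1 := by
        simp; omega
      simp only [loopA, h1, if_true]
      rw [if_neg (by simpa using h), hrec, h2, List.take_succ_cons]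
      simp

-- before any matching line A collects nothing; at the first match it switches
theorem loopA_false (ls : List String) :
    loopA ls [] false =
      match ls.findIdx? voiceLine with
      | some i => (ls.drop i).take 21
      | none => [] := by
  induction ls with
  | nil => simp [loopA]
  | cons line rest ih =>
    by_cases h : voiceLine line
    · simp only [loopA, h, if_true]
      rw [if_neg (by simp), List.nil_append, loopA_true rest [line] (by simp)]
      simp [List.findIdx?_cons, h, List.take_succ_cons]
    · simp only [loopA, h, if_false, Bool.false_eq_true]
      rw [ih]
      cases hfi : List.findIdx? voiceLine rest <;>
        simp [List.findIdx?_cons, h, hfi]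

theorem extract_voice_rules_eq (context : String) :
    extract_voice_rules context = extract_voice_rules_alt context := by
  unfold extract_voice_rules extract_voice_rules_alt
  by_cases hg : (PySem.Str.isIn "voice" (PySem.Str.lower context) &&
      PySem.Str.isIn "casual" (PySem.Str.lower context)) = true
  · simp only [hg, if_true]
    set lines := (PySem.Str.split? context "\n").getD [] with hlines
    rw [loopA_false]
    cases hfi : lines.findIdx? voiceLine with
    | none => simp
    | some i =>
      have hi : i < lines.length := (List.findIdx?_eq_some_iff_findIdx_eq.mp hfi).1
      have hslice : PySem.List.slice lines (some (i : Int)) (some ((i : Int) + 21)) =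
          (lines.drop i).take 21 := by
        have := PySem.List.slice_natCast_add lines i 21
        exact_mod_cast this
      have hne : ((lines.drop i).take 21) ≠ [] := by
        simp [List.take_eq_nil_iff, List.drop_eq_nil_iff]
        omega
      simp [hslice, hne]
  · simp only [if_neg hg]

-- ===== VERDICT (by name: the statement is the Claim_ definition above) =====
theorem extract_voice_rules_spec : Claim_equal_extract_voice_rules := by
  intro context _
  exact extract_voice_rules_eq context
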